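-- pv_equiv track=rewrite | github.com/corazza/stochastic-reward-machines | src/rl_agents/sjirp/util.py | clean_trace
-- ===== SOURCE A (Python) =====
-- def clean_trace(labels, rewards):
--     no_more_than = 10
--     labels_new = list()
--     rewards_new = list()
--     last = None
--     counter = 0
--     for i in range(0, len(labels)):
--         if labels[i] == last and counter > no_more_than:
--             continue
--         elif labels[i] == last:
--             counter += 1
--         else:
--             counter = 0
--         labels_new.append(labels[i])
--         rewards_new.append(rewards[i])
--         last = labels[i]
--     return ((tuple(labels_new), tuple(rewards_new)))
-- ===== SOURCE B (Python) =====
-- def clean_trace(labels, rewards):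
--     labels_new = []
--     rewards_new = []
--     i = 0
--     total = len(labels)
--     while i < total:
--         x = labels[i]
--         j = i + 1
--         while j < total and labels[j] == x:
--             j += 1
--         n = j - i
--         k = min(n, 12)
--         labels_new.extend([x] * k)
--         for t in range(k):
--             rewards_new.append(rewards[i + t])
--         i = j
--     return ((tuple(labels_new), tuple(rewards_new)))
-- ===== Notes on version B (the rewrite author's own statement) =====
-- stated objective: alternative
-- what changed: B replaces A's element-by-element scan with last/counter state by an explicit run-detection two-pointer loop: it finds each maximal run of equal consecutive labels, keeps min(run,12) copies of the label and the rewards at those positions, then jumps past the run.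
import Mathlib
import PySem

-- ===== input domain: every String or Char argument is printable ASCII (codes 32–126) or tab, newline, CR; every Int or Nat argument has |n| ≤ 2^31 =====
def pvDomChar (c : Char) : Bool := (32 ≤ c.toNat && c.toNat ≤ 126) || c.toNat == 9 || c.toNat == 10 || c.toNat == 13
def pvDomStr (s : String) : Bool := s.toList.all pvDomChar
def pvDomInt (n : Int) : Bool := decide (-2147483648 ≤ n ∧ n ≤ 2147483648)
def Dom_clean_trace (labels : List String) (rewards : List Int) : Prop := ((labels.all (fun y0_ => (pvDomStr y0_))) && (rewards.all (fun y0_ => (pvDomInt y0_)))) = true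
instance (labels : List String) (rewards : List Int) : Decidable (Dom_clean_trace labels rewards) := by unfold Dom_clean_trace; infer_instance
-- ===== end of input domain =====

-- B collapses runs of repeated labels by an explicit run-detection (two-pointer) scan instead of
-- A's per-element last/counter state machine; same cost, alternative structure.

-- ===== PORT A =====
-- loop body of A: state = (labels_new, rewards_new, last, counter); rewards[i] is read only on
-- kept indices; pyGetD's default 0 is never reached inside Pre_ (labels.length ≤ rewards.length)
def pvStepA (labels : List String) (rewards : List Int)
    (st : List String × List Int × Option String × Int) (i : Int) :
    List String × List Int × Option String × Int :=
  if some (PySem.List.pyGetD labels i "") = st.2.2.1 ∧ st.2.2.2 > 10 then st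
  else (st.1 ++ [PySem.List.pyGetD labels i ""],
        st.2.1 ++ [PySem.List.pyGetD rewards i 0],
        some (PySem.List.pyGetD labels i ""),
        if some (PySem.List.pyGetD labels i "") = st.2.2.1 then st.2.2.2 + 1 else 0)

def clean_trace (labels : List String) (rewards : List Int) : List String × List Int :=
  let st := (PySem.List.pyRange 0 (PySem.List.len labels) 1).foldl
              (pvStepA labels rewards) ([], [], none, 0)
  (st.1, st.2.1)

-- ===== PORT B =====
-- outer while loop of B: rest is the unprocessed suffix, pos its position in the original lists
def pvBloop (rewards : List Int) : List String → Int → List String → List Int →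
    List String × List Int
  | [], _, ln, rn => (ln, rn)
  | x :: xs, pos, ln, rn =>
      let n : Nat := (xs.takeWhile (· == x)).length + 1
      let k : Nat := min n 12
      pvBloop rewards (xs.dropWhile (· == x)) (pos + (n : Int))
        (ln ++ List.replicate k x)
        (rn ++ (List.range k).map (fun t : Nat => PySem.List.pyGetD rewards (pos + (t : Int)) 0))
  termination_by l => l.length
  decreasing_by
    have := List.length_dropWhile_le (p := (· == x)) (l := xs)
    simp; omega

def clean_trace_alt (labels : List String) (rewards : List Int) : List String × List Int :=
  pvBloop rewards labels 0 [] []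

-- ===== PRECONDITION & SPEC =====
-- Pre_ excludes ragged inputs (rewards shorter than labels): there Python A raises IndexError,
-- except when every over-length position is dropped by the 12-cap, in which case A returns and
-- B returns the same value (see claim.json cite).
def Pre_clean_trace (labels : List String) (rewards : List Int) : Prop :=
  labels.length ≤ rewards.length
instance (labels : List String) (rewards : List Int) : Decidable (Pre_clean_trace labels rewards) := by
  unfold Pre_clean_trace; infer_instance

def pvWitness_clean_trace : List String × List Int := (["a", "a", "b"], [1, 2, 3])

def Spec_clean_trace (labels : List String) (rewards : List Int) (out : List String × List Int) : Prop := out = clean_trace_alt labels rewards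
instance (labels : List String) (rewards : List Int) (out : List String × List Int) : Decidable (Spec_clean_trace labels rewards out) := by unfold Spec_clean_trace; infer_instance

-- ===== CLAIM (what is proved, stated in full; the proofs are below) =====
def Claim_equal_clean_trace : Prop := ∀ (labels : List String) (rewards : List Int), Dom_clean_trace labels rewards → Pre_clean_trace labels rewards → Spec_clean_trace labels rewards (clean_trace labels rewards)

-- ===== LEMMAS AND PROOFS =====

-- A's step, rephrased on an (index, label) pair (definitionally equal to pvStepA)
def pvStepE (rewards : List Int)
    (st : List String × List Int × Option String × Int) (p : Int × String) :
    List String × List Int × Option String × Int :=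
  if some p.2 = st.2.2.1 ∧ st.2.2.2 > 10 then st
  else (st.1 ++ [p.2],
        st.2.1 ++ [PySem.List.pyGetD rewards p.1 0],
        some p.2,
        if some p.2 = st.2.2.1 then st.2.2.2 + 1 else 0)

lemma pvA_fold_enum (labels : List String) (rewards : List Int)
    (init : List String × List Int × Option String × Int) :
    (PySem.List.pyRange 0 (PySem.List.len labels) 1).foldl (pvStepA labels rewards) init
      = (PySem.List.enumerate labels 0).foldl (pvStepE rewards) init := by
  rw [PySem.List.enumerate_eq_map_pyRange (d := ""), List.foldl_map]
  rfl

lemma pvRangeShift (rewards : List Int) (k : Nat) (pos : Int) :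
    (List.range (k+1)).map (fun t : Nat => PySem.List.pyGetD rewards (pos + (t : Int)) 0)
      = PySem.List.pyGetD rewards pos 0
        :: (List.range k).map (fun t : Nat => PySem.List.pyGetD rewards ((pos + 1) + (t : Int)) 0) := by
  rw [List.range_succ_eq_map, List.map_cons, List.map_map]
  refine congrArg₂ _ (by norm_num) (List.map_congr_left ?_)
  intro t _
  simp only [Function.comp_apply, Nat.succ_eq_add_one]
  congr 1
  push_cast
  ring

-- processing a run of m copies of x with last = x and counter c (0 ≤ c ≤ 11)
lemma pvRunFold (rewards : List Int) (x : String) :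
    ∀ (m : Nat) (pos : Int) (ln : List String) (rn : List Int) (c : Int),
      0 ≤ c → c ≤ 11 →
      (PySem.List.enumerate (List.replicate m x) pos).foldl (pvStepE rewards) (ln, rn, some x, c)
        = (ln ++ List.replicate (min m (11 - c).toNat) x,
           rn ++ (List.range (min m (11 - c).toNat)).map
                   (fun t : Nat => PySem.List.pyGetD rewards (pos + (t : Int)) 0),
           some x, min (c + m) 11) := by
  intro m
  induction m with
  | zero =>
    intro pos ln rn c h0 h1
    simp
    omega
  | succ m ih =>
    intro pos ln rn c h0 h1
    rw [List.replicate_succ, PySem.List.enumerate_cons, List.foldl_cons]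
    by_cases hc : c > 10
    · have hc11 : c = 11 := by omega
      have hstep : pvStepE rewards (ln, rn, some x, c) (pos, x) = (ln, rn, some x, c) := by
        simp [pvStepE, hc]
      rw [hstep, ih (pos+1) ln rn c h0 h1]
      subst hc11
      refine Prod.ext ?_ (Prod.ext ?_ (Prod.ext rfl ?_))
      · norm_num
      · norm_num
      · simp only []
        omega
    · have hstep : pvStepE rewards (ln, rn, some x, c) (pos, x)
          = (ln ++ [x], rn ++ [PySem.List.pyGetD rewards pos 0], some x, c + 1) := by
        simp [pvStepE, hc]
      rw [hstep, ih (pos+1) _ _ (c+1) (by omega) (by omega)]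
      have hk : min (m + 1) (11 - c).toNat = min m (11 - (c+1)).toNat + 1 := by omega
      refine Prod.ext ?_ (Prod.ext ?_ (Prod.ext rfl ?_))
      · simp only [hk, List.replicate_succ, List.append_assoc]
        rfl
      · simp only [hk, pvRangeShift, List.append_assoc]
        rfl
      · simp only []
        omega

-- processing a run of m+1 copies of x starting fresh (last ≠ some x)
lemma pvRunStart (rewards : List Int) (x : String) (m : Nat) (pos : Int)
    (ln : List String) (rn : List Int) (last : Option String) (c : Int)
    (h : last ≠ some x) :
    (PySem.List.enumerate (List.replicate (m + 1) x) pos).foldl (pvStepE rewards) (ln, rn, last, c)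
      = (ln ++ List.replicate (min (m + 1) 12) x,
         rn ++ (List.range (min (m + 1) 12)).map
                 (fun t : Nat => PySem.List.pyGetD rewards (pos + (t : Int)) 0),
         some x, min (m : Int) 11) := by
  rw [List.replicate_succ, PySem.List.enumerate_cons, List.foldl_cons]
  have hne : ¬ (some x = last) := fun hh => h hh.symm
  have hstep : pvStepE rewards (ln, rn, last, c) (pos, x)
      = (ln ++ [x], rn ++ [PySem.List.pyGetD rewards pos 0], some x, 0) := by
    simp [pvStepE, hne]
  rw [hstep, pvRunFold rewards x m (pos+1) _ _ 0 (by omega) (by omega)]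
  have hk : min (m + 1) 12 = min m (11 - (0:Int)).toNat + 1 := by omega
  refine Prod.ext ?_ (Prod.ext ?_ (Prod.ext rfl ?_))
  · simp only [hk, List.replicate_succ, List.append_assoc]
    rfl
  · rw [hk, pvRangeShift]
    simp [List.append_assoc]
  · simp only []
    omega

lemma pvHeadDrop (p : String → Bool) :
    ∀ (l : List String) (y : String) (ys : List String),
      l.dropWhile p = y :: ys → p y = false := by
  intro l
  induction l with
  | nil => intro y ys h; simp [List.dropWhile] at h
  | cons a l ih =>
    intro y ys h
    by_cases hp : p a = true
    · exact ih y ys (by simpa [List.dropWhile, hp] using h)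
    · have hb : p a = false := by simpa using hp
      simp [List.dropWhile, hb] at h
      rw [← h.1]; exact hb

lemma pvMain (rewards : List Int) :
    ∀ (N : Nat) (labels : List String), labels.length ≤ N →
    ∀ (pos : Int) (ln : List String) (rn : List Int) (last : Option String) (c : Int),
      (∀ x, labels.head? = some x → last ≠ some x) →
      (((PySem.List.enumerate labels pos).foldl (pvStepE rewards) (ln, rn, last, c)).1,
       ((PySem.List.enumerate labels pos).foldl (pvStepE rewards) (ln, rn, last, c)).2.1)
        = pvBloop rewards labels pos ln rn := by
  intro N
  induction N with
  | zero =>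
    intro labels hN pos ln rn last c _
    have : labels = [] := List.eq_nil_of_length_eq_zero (Nat.le_zero.mp hN)
    subst this
    simp [pvBloop, PySem.List.enumerate]
  | succ N ih =>
    intro labels hN pos ln rn last c hfresh
    cases labels with
    | nil => simp [pvBloop, PySem.List.enumerate]
    | cons x xs =>
      have ht : xs.takeWhile (· == x) = List.replicate (xs.takeWhile (· == x)).length x :=
        List.eq_replicate_of_mem (fun b hb => eq_of_beq (List.mem_takeWhile_imp (p := (· == x)) hb))
      have hsplit : x :: xs
          = List.replicate ((xs.takeWhile (· == x)).length + 1) x ++ xs.dropWhile (· == x) := by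
        rw [List.replicate_succ, List.cons_append, ← ht, List.takeWhile_append_dropWhile]
      rw [show pvBloop rewards (x :: xs) pos ln rn
            = pvBloop rewards (xs.dropWhile (· == x))
                (pos + (((xs.takeWhile (· == x)).length + 1 : Nat) : Int))
                (ln ++ List.replicate (min ((xs.takeWhile (· == x)).length + 1) 12) x)
                (rn ++ (List.range (min ((xs.takeWhile (· == x)).length + 1) 12)).map
                        (fun t : Nat => PySem.List.pyGetD rewards (pos + (t : Int)) 0))
            from by rw [pvBloop]]
      conv_lhs => rw [hsplit]
      rw [PySem.List.enumerate_append, List.foldl_append,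
        pvRunStart rewards x _ pos ln rn last c (hfresh x rfl)]
      have hlen : xs.length ≤ N := by simpa using hN
      have hr : (xs.dropWhile (· == x)).length ≤ N :=
        le_trans (List.length_dropWhile_le _ _) hlen
      rw [show (pos + ((List.replicate ((xs.takeWhile (· == x)).length + 1) x).length : Int))
            = pos + (((xs.takeWhile (· == x)).length + 1 : Nat) : Int) from by simp]
      exact ih (xs.dropWhile (· == x)) hr _ _ _ _ _
        (by
          intro y hy hcon
          have hxy : x = y := by injection hcon
          cases hdw : xs.dropWhile (· == x) with
          | nil => rw [hdw] at hy; simp at hy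
          | cons z zs =>
            rw [hdw] at hy
            have hzy : z = y := by simpa using hy
            have hz := pvHeadDrop _ xs z zs hdw
            rw [hzy, ← hxy] at hz
            simp at hz)

-- ===== VERDICT (by name: the statement is the Claim_ definition above) =====
theorem clean_trace_spec : Claim_equal_clean_trace := by
  intro labels rewards _ _
  unfold Spec_clean_trace clean_trace clean_trace_alt
  rw [pvA_fold_enum]
  exact pvMain rewards labels.length labels le_rfl 0 [] [] none 0
    (by intro x _ h; cases h)
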